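-- pv_equiv track=rewrite | github.com/yamilajoyshih/unruly | tp1/unruly.py | grilla_terminada
-- ===== SOURCE A (Python) =====
-- from typing import List, Tuple, Any
--
-- Grilla = Any
--
-- UNO= "1"
--
-- CERO= "0"
--
-- VACIO= " "
--
-- def es_valida(valor_de_la_celda) -> bool:
--     """Devuelve un booleano indicando si la lista de valores cumple las tres condiciones para ser considerada valida """
--     if VACIO in valor_de_la_celda:
--         return False
--     suma_de_unos = sum(1 for valor in valor_de_la_celda if valor == UNO )
--     suma_de_ceros = sum (1 for valor in valor_de_la_celda if valor == CERO)
--     if suma_de_unos != suma_de_ceros: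
--         return False
--     for i in range (len(valor_de_la_celda)-2):
--         if valor_de_la_celda[i] == valor_de_la_celda[i+1] == valor_de_la_celda [i+2]:
--             return False
--     return True
--
-- def fila_es_valida(grilla: Grilla, fil: int) -> bool:
--     """Devuelve un booleano indicando si la fila de la grilla denotada por el
--     índice `fil` es considerada válida.
--
--     Una fila válida cuando se cumplen todas estas condiciones:
--         - La fila no tiene vacíos
--         - La fila tiene la misma cantidad de unos y ceros
--         - La fila no contiene tres casilleros consecutivos del mismo valor
--     """
--     valor_de_la_celda= grilla[fil]
--     return es_valida (valor_de_la_celda)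
--
-- def columna_es_valida(grilla: Grilla, col: int) -> bool:
--     """Devuelve un booleano indicando si la columna de la grilla denotada por
--     el índice `col` es considerada válida.
--
--     Las condiciones para que una columna sea válida son las mismas que las
--     condiciones de las filas."""
--     valor_de_la_celda=[fila[col]for fila in grilla]
--     return es_valida (valor_de_la_celda)
--
-- def grilla_terminada(grilla: Grilla) -> bool:
--     """Devuelve un booleano indicando si la grilla se encuentra terminada.
--
--     Una grilla se considera terminada si todas sus filas y columnas son
--     válidas."""
--     for i in range (len(grilla)):
--         if not fila_es_valida(grilla, i):
--             return False
--     for j in range (len(grilla[0])):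
--         if not columna_es_valida(grilla, j):
--             return False
--     return True
-- ===== SOURCE B (Python) =====
-- def _linea_valida(linea):
--     unos = 0
--     ceros = 0
--     racha = 0
--     prev = None
--     for v in linea:
--         if v == " ":
--             return False
--         if v == "1":
--             unos += 1
--         elif v == "0":
--             ceros += 1
--         if v == prev:
--             racha += 1
--             if racha >= 3:
--                 return False
--         else:
--             prev = v
--             racha = 1
--     return unos == ceros
--
--
-- def grilla_terminada(grilla):
--     """Una grilla esta terminada si todas sus filas y columnas son validas."""
--     for fila in grilla:
--         if not _linea_valida(fila):
--             return False
--     for j in range(len(grilla[0])):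
--         if not _linea_valida([fila[j] for fila in grilla]):
--             return False
--     return True
-- ===== Notes on version B (the rewrite author's own statement) =====
-- stated objective: alternative
-- what changed: The four separate scans per line (membership test for a space, two 0/1-counting sum-comprehensions, and an index-based triple scan) are replaced by one single pass per line that keeps ones/zeros counters and a run-length counter of consecutive equal cells, early-returning on a space or a run of three.
-- outside the precondition, e.g. on grilla_terminada([['0', '1'], ['x']]): A returns False, B returns False; on grilla_terminada([]): A raises IndexError, B raises IndexError; on grilla_terminada([['x', '1', '0', 'y'], ['z']]): A raises IndexError, B raises IndexError
import Mathlib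
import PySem

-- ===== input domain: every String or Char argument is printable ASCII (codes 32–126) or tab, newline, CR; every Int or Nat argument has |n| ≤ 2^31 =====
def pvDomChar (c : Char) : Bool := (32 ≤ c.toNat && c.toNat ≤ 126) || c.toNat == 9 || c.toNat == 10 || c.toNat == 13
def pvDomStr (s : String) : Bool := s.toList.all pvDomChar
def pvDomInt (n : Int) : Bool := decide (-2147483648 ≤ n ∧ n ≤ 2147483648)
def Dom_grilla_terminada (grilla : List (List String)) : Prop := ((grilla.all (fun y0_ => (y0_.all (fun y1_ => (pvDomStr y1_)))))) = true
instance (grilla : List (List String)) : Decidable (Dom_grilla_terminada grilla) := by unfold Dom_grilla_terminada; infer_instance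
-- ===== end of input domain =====

-- B replaces A's four scans per line (membership, two counting sums, index triple scan)
-- with one single pass keeping counters and a run length (objective: alternative decomposition).

-- ===== PORT A =====
-- es_valida: membership test, two counting sums, then an index scan for a triple.
def es_valida (l : List String) : Bool :=
  if l.contains " " then false
  else
    let suma_de_unos : Int := ((l.filter (fun v => v == "1")).length : Int)
    let suma_de_ceros : Int := ((l.filter (fun v => v == "0")).length : Int)
    if suma_de_unos ≠ suma_de_ceros then false
    else if (List.range (l.length - 2)).any
        (fun i => (l.getD i "" == l.getD (i+1) "") && (l.getD (i+1) "" == l.getD (i+2) "")) then false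
    else true

def fila_es_valida (grilla : List (List String)) (fil : Nat) : Bool :=
  es_valida (grilla.getD fil [])

def columna_es_valida (grilla : List (List String)) (col : Nat) : Bool :=
  es_valida (grilla.map (fun fila => fila.getD col ""))

def grilla_terminada (grilla : List (List String)) : Bool :=
  ((List.range grilla.length).all (fun i => fila_es_valida grilla i)) &&
  ((List.range (grilla.headD []).length).all (fun j => columna_es_valida grilla j))

-- ===== PORT B =====
-- single pass per line: ones/zeros counters + run length of consecutive equal values, early returns.
def linea_valida : List String → Int → Int → Int → Option String → Bool
  | [], unos, ceros, _, _ => unos == ceros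
  | v :: rest, unos, ceros, racha, prev =>
    if v == " " then false
    else
      let unos' := if v == "1" then unos + 1 else unos
      let ceros' := if v == "1" then ceros else if v == "0" then ceros + 1 else ceros
      if some v == prev then
        if racha + 1 ≥ 3 then false
        else linea_valida rest unos' ceros' (racha + 1) prev
      else linea_valida rest unos' ceros' 1 (some v)

def grilla_terminada_alt (grilla : List (List String)) : Bool :=
  (grilla.all (fun fila => linea_valida fila 0 0 0 none)) &&
  ((List.range (grilla.headD []).length).all
    (fun j => linea_valida (grilla.map (fun fila => fila.getD j "")) 0 0 0 none))

-- ===== PRECONDITION & SPEC =====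
-- "some three consecutive cells are equal", structural form (used by Pre_ and the proofs)
def hasTriple : List String → Bool
  | a :: b :: c :: r => (a == b && b == c) || hasTriple (b :: c :: r)
  | _ => false

-- a row that the row pass rejects (no space, equal ones/zeros counts, no triple fails)
def fila_valida (l : List String) : Bool :=
  !(l.contains " ") &&
  ((l.filter (fun v => v == "1")).length == (l.filter (fun v => v == "0")).length) &&
  !hasTriple l

-- Pre_ excludes the empty grid (grilla[0] raises IndexError) and ragged grids whose rows are
-- all valid and whose first row is longer than some later row: there the column pass indexes
-- past the short row and raises IndexError, except when an earlier column is already invalid,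
-- in which case A happens to return False; Python B behaves identically on all of them.
def Pre_grilla_terminada (grilla : List (List String)) : Prop :=
  grilla ≠ [] ∧
    ((∀ fila ∈ grilla, (grilla.headD []).length ≤ fila.length) ∨
      (∃ fila ∈ grilla, fila_valida fila = false))
instance (grilla : List (List String)) : Decidable (Pre_grilla_terminada grilla) := by
  unfold Pre_grilla_terminada; infer_instance

def pvWitness_grilla_terminada : List (List String) := [["0", "1"], ["1", "0"]]

def Spec_grilla_terminada (grilla : List (List String)) (out : Bool) : Prop := out = grilla_terminada_alt grilla
instance (grilla : List (List String)) (out : Bool) : Decidable (Spec_grilla_terminada grilla out) := by unfold Spec_grilla_terminada; infer_instance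

-- ===== CLAIM (what is proved, stated in full; the proofs are below) =====
def Claim_equal_grilla_terminada : Prop := ∀ (grilla : List (List String)), Dom_grilla_terminada grilla → Pre_grilla_terminada grilla → Spec_grilla_terminada grilla (grilla_terminada grilla)

-- ===== LEMMAS AND PROOFS =====

-- the run-length part of linea_valida, isolated from the counters
def okRun : Option String → Int → List String → Bool
  | _, _, [] => true
  | prev, racha, v :: rest =>
    if some v == prev then (if racha + 1 ≥ 3 then false else okRun prev (racha + 1) rest)
    else okRun (some v) 1 rest

theorem range_any_eq_hasTriple (l : List String) :
    (List.range (l.length - 2)).any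
      (fun i => (l.getD i "" == l.getD (i+1) "") && (l.getD (i+1) "" == l.getD (i+2) ""))
      = hasTriple l := by
  match l with
  | [] => rfl
  | [a] => rfl
  | [a, b] => rfl
  | a :: b :: c :: r =>
    have h : (a :: b :: c :: r).length - 2 = r.length + 1 := by simp
    rw [h, List.range_succ_eq_map]
    have ih := range_any_eq_hasTriple (b :: c :: r)
    have h2 : (b :: c :: r).length - 2 = r.length := by simp
    rw [h2] at ih
    simp only [List.any_cons, List.any_map, Function.comp_def]
    rw [hasTriple, ← ih]
    congr 1

theorem okRun_one_two (l : List String) :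
    (∀ a : String, okRun (some a) 1 l = !hasTriple (a :: l)) ∧
    (∀ a : String, okRun (some a) 2 l = !hasTriple (a :: a :: l)) := by
  induction l with
  | nil =>
    constructor <;> intro a <;> simp [okRun, hasTriple]
  | cons v rest ih =>
    obtain ⟨ih1, ih2⟩ := ih
    have hstep : ∀ a : String, (v == a) = false → hasTriple (a :: v :: rest) = hasTriple (v :: rest) := by
      intro a hva
      have hav : (a == v) = false := by
        cases h : a == v
        · rfl
        · rw [beq_iff_eq] at h; subst h; simp at hva
      match rest with
      | [] => simp [hasTriple]
      | c :: r2 => simp [hasTriple, hav]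
    constructor
    · intro a
      by_cases hv : v = a
      · subst hv
        simp only [okRun, beq_self_eq_true, if_true]
        have : ¬ ((1:Int) + 1 ≥ 3) := by omega
        rw [if_neg this]
        have : (1:Int) + 1 = 2 := by omega
        rw [this, ih2 v]
      · have hb : (some v == some a) = false := by simp [hv]
        simp only [okRun, hb, Bool.false_eq_true, if_false]
        rw [ih1 v, hstep a (by simp [hv])]
    · intro a
      by_cases hv : v = a
      · subst hv
        simp only [okRun, beq_self_eq_true, if_true]
        have : ((2:Int) + 1 ≥ 3) := by omega
        rw [if_pos this]
        simp [hasTriple]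
      · have hb : (some v == some a) = false := by simp [hv]
        simp only [okRun, hb, Bool.false_eq_true, if_false]
        rw [ih1 v]
        have hav : (a == v) = false := by simp [Ne.symm hv]
        simp only [hasTriple, beq_self_eq_true, hav, Bool.true_and, Bool.false_or]
        rw [hstep a (by simp [hv])]

theorem okRun_start (l : List String) : okRun none 0 l = !hasTriple l := by
  match l with
  | [] => rfl
  | v :: rest =>
    have hb : (some v == (none : Option String)) = false := rfl
    simp only [okRun, hb, Bool.false_eq_true, if_false]
    exact (okRun_one_two rest).1 v

theorem linea_valida_eq (l : List String) :
    ∀ (unos ceros racha : Int) (prev : Option String),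
      linea_valida l unos ceros racha prev =
        (!(l.contains " ") && okRun prev racha l &&
          (unos + ((l.filter (fun v => v == "1")).length : Int)
            == ceros + ((l.filter (fun v => v == "0")).length : Int))) := by
  induction l with
  | nil => intro unos ceros racha prev; simp [linea_valida, okRun]
  | cons v rest ih =>
    intro unos ceros racha prev
    by_cases hsp : v = " "
    · subst hsp
      simp [linea_valida]
    · have hspb : (v == " ") = false := by simp [hsp]
      have hcount :
          ∀ (unos ceros : Int),
            ((if v == "1" then unos + 1 else unos) + ((rest.filter (fun w => w == "1")).length : Int)
              == (if v == "1" then ceros else if v == "0" then ceros + 1 else ceros)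
                  + ((rest.filter (fun w => w == "0")).length : Int))
            = (unos + (((v :: rest).filter (fun w => w == "1")).length : Int)
              == ceros + (((v :: rest).filter (fun w => w == "0")).length : Int)) := by
        intro u c
        by_cases h1 : v = "1"
        · subst h1
          simp
          omega
        · have h1b : (v == "1") = false := by simp [h1]
          by_cases h0 : v = "0"
          · subst h0
            simp
            omega
          · have h0b : (v == "0") = false := by simp [h0]
            simp [h1b, h0b]
      simp only [linea_valida, hspb, Bool.false_eq_true, if_false]
      by_cases hpr : some v == prev
      · rw [if_pos hpr]
        by_cases hr : racha + 1 ≥ 3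
        · rw [if_pos hr]
          have : okRun prev racha (v :: rest) = false := by
            simp only [okRun, hpr, if_true, if_pos hr]
          rw [this]
          simp
        · rw [if_neg hr, ih]
          have : okRun prev racha (v :: rest) = okRun prev (racha + 1) rest := by
            simp only [okRun, hpr, if_true, if_neg hr]
          rw [this]
          have hspb2 : ((" ":String) == v) = false := by simp [Ne.symm hsp]
          simp only [List.contains_cons, hspb2, Bool.false_or]
          rw [hcount]
      · have hprb : (some v == prev) = false := by
          cases h : some v == prev
          · rfl
          · exact absurd h hpr
        rw [if_neg (by simp [hprb]), ih]
        have : okRun prev racha (v :: rest) = okRun (some v) 1 rest := by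
          simp only [okRun, hprb, Bool.false_eq_true, if_false]
        rw [this]
        have hspb2 : ((" ":String) == v) = false := by simp [Ne.symm hsp]
        simp only [List.contains_cons, hspb2, Bool.false_or]
        rw [hcount]

theorem es_valida_eq (l : List String) : es_valida l = linea_valida l 0 0 0 none := by
  rw [linea_valida_eq, okRun_start]
  unfold es_valida
  rw [range_any_eq_hasTriple]
  cases hc : l.contains " "
  · cases he : (((l.filter (fun v => v == "1")).length : Int) == ((l.filter (fun v => v == "0")).length : Int))
    · rw [beq_eq_false_iff_ne] at he
      simp [he]
    · rw [beq_iff_eq] at he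
      cases ht : hasTriple l <;> simp [he]
  · simp

theorem all_range_getD {α : Type} (l : List α) (d : α) (f : α → Bool) :
    (List.range l.length).all (fun i => f (l.getD i d)) = l.all f := by
  induction l with
  | nil => rfl
  | cons x xs ih =>
    rw [List.length_cons, List.range_succ_eq_map]
    simp only [List.all_cons, List.all_map, Function.comp_def, List.getD_cons_zero,
      List.getD_cons_succ]
    rw [ih]

theorem ports_agree (grilla : List (List String)) :
    grilla_terminada grilla = grilla_terminada_alt grilla := by
  unfold grilla_terminada grilla_terminada_alt fila_es_valida columna_es_valida
  have h1 : (List.range grilla.length).all (fun i => es_valida (grilla.getD i []))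
      = grilla.all (fun fila => linea_valida fila 0 0 0 none) := by
    rw [all_range_getD grilla [] es_valida,
      show es_valida = (fun l => linea_valida l 0 0 0 none) from funext es_valida_eq]
  have h2 : (List.range (grilla.headD []).length).all
        (fun j => es_valida (grilla.map (fun fila => fila.getD j "")))
      = (List.range (grilla.headD []).length).all
        (fun j => linea_valida (grilla.map (fun fila => fila.getD j "")) 0 0 0 none) := by
    rw [show es_valida = (fun l => linea_valida l 0 0 0 none) from funext es_valida_eq]
  rw [h1, h2]

-- ===== VERDICT (by name: the statement is the Claim_ definition above) =====
theorem grilla_terminada_spec : Claim_equal_grilla_terminada := by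
  intro grilla _ _
  show grilla_terminada grilla = grilla_terminada_alt grilla
  exact ports_agree grilla
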